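-- pv_equiv track=rewrite | github.com/anjanthapa26/Leetcode | leetcode/string_pair.py | num_pairs
-- ===== SOURCE A (Python) =====
-- from collections import Counter
--
-- def num_pairs(nums,target):
--     col_ = Counter(nums)
--     res = 0
--     for k,v in col_.items():
--         if k == target[:len(k)] and target[len(k):] in col_:
--             res += col_[target[len(k):]] * col_[target[:len(k)]]
--         if k == target[len(k):] and k == target[:len(k)]:
--             res -= col_[target[len(k):]]
--     return res
-- ===== SOURCE B (Python) =====
-- from collections import Counter
--
-- def num_pairs(nums, target):
--     cnt = Counter(nums)
--     res = 0
--     for w in nums: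
--         if target.startswith(w):
--             res += cnt[target[len(w):]]
--         if w + w == target:
--             res -= 1
--     return res
-- ===== Notes on version B (the rewrite author's own statement) =====
-- stated objective: simpler
-- what changed: A iterates over the distinct keys of Counter(nums), multiplies two counter lookups per prefix key and then subtracts counter values to correct for self-pairs; B instead loops once over the words themselves, adding one counter lookup per word that prefixes target and subtracting 1 per word w with w+w == target, with no products and no correction pass.
import Mathlib
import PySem

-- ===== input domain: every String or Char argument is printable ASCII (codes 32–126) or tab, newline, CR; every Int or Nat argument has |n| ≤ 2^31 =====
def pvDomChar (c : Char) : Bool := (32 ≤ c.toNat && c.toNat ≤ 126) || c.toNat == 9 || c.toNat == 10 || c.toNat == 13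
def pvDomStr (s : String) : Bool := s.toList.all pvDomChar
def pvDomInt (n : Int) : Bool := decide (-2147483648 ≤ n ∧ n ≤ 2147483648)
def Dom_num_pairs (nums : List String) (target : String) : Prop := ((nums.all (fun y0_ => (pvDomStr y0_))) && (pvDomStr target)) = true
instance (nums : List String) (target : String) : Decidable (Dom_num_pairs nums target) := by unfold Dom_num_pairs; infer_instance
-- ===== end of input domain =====

-- B replaces A's loop over Counter items with its product-and-subtract correction by a plain
-- per-element loop (one Counter lookup per word, minus 1 per self-concatenating word): simpler, same cost.

-- ===== PORT A =====
def num_pairs (nums : List String) (target : String) : Int :=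
  let col_ := PySem.Dict.counter nums
  (PySem.Dict.items col_).foldl (fun res kv =>
    let k := kv.1
    let res :=
      if k == PySem.Str.slice target none (some (PySem.Str.len k)) &&
         PySem.Dict.contains col_ (PySem.Str.slice target (some (PySem.Str.len k)) none) then
        res + PySem.Dict.getD col_ (PySem.Str.slice target (some (PySem.Str.len k)) none) 0 *
              PySem.Dict.getD col_ (PySem.Str.slice target none (some (PySem.Str.len k))) 0
      else res
    if k == PySem.Str.slice target (some (PySem.Str.len k)) none &&
       k == PySem.Str.slice target none (some (PySem.Str.len k)) then
      res - PySem.Dict.getD col_ (PySem.Str.slice target (some (PySem.Str.len k)) none) 0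
    else res) 0

-- ===== PORT B =====
def num_pairs_alt (nums : List String) (target : String) : Int :=
  let cnt := PySem.Dict.counter nums
  nums.foldl (fun res w =>
    let res :=
      if PySem.Str.startswith target w then
        res + PySem.Dict.getD cnt (PySem.Str.slice target (some (PySem.Str.len w)) none) 0
      else res
    -- Python's 'w + w == target' (str concatenation compared): exact as List Char append equality
    if w.toList ++ w.toList == target.toList then res - 1 else res) 0

-- ===== PRECONDITION & SPEC =====
def Spec_num_pairs (nums : List String) (target : String) (out : Int) : Prop := out = num_pairs_alt nums target
instance (nums : List String) (target : String) (out : Int) : Decidable (Spec_num_pairs nums target out) := by unfold Spec_num_pairs; infer_instance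

-- ===== CLAIM (what is proved, stated in full; the proofs are below) =====
def Claim_equal_num_pairs : Prop := ∀ (nums : List String) (target : String), Dom_num_pairs nums target → Spec_num_pairs nums target (num_pairs nums target)

-- ===== LEMMAS AND PROOFS =====

-- per-key contribution of A's loop body (kv.2 is unused, exactly as in A's Python)
def fA (nums : List String) (target : String) (k : String) : Int :=
  (if k == PySem.Str.slice target none (some (PySem.Str.len k)) &&
      PySem.Dict.contains (PySem.Dict.counter nums) (PySem.Str.slice target (some (PySem.Str.len k)) none) then
     PySem.Dict.getD (PySem.Dict.counter nums) (PySem.Str.slice target (some (PySem.Str.len k)) none) 0 *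
     PySem.Dict.getD (PySem.Dict.counter nums) (PySem.Str.slice target none (some (PySem.Str.len k))) 0
   else 0) -
  (if k == PySem.Str.slice target (some (PySem.Str.len k)) none &&
      k == PySem.Str.slice target none (some (PySem.Str.len k)) then
     PySem.Dict.getD (PySem.Dict.counter nums) (PySem.Str.slice target (some (PySem.Str.len k)) none) 0
   else 0)

-- per-element contribution of B's loop body
def fB (nums : List String) (target : String) (w : String) : Int :=
  (if PySem.Str.startswith target w then
     PySem.Dict.getD (PySem.Dict.counter nums) (PySem.Str.slice target (some (PySem.Str.len w)) none) 0
   else 0) -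
  (if w.toList ++ w.toList == target.toList then 1 else 0)

lemma numA_eq_sum (nums : List String) (target : String) :
    num_pairs nums target = ((PySem.Set.ofList nums).map (fA nums target)).sum := by
  simp only [num_pairs]
  rw [PySem.Dict.items_counter, List.foldl_map]
  have h : (fun (res : Int) (k : String) =>
      (fun (res : Int) (kv : String × Int) =>
        let k := kv.1
        let res :=
          if k == PySem.Str.slice target none (some (PySem.Str.len k)) &&
             PySem.Dict.contains (PySem.Dict.counter nums) (PySem.Str.slice target (some (PySem.Str.len k)) none) then
            res + PySem.Dict.getD (PySem.Dict.counter nums) (PySem.Str.slice target (some (PySem.Str.len k)) none) 0 *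
                  PySem.Dict.getD (PySem.Dict.counter nums) (PySem.Str.slice target none (some (PySem.Str.len k))) 0
          else res
        if k == PySem.Str.slice target (some (PySem.Str.len k)) none &&
           k == PySem.Str.slice target none (some (PySem.Str.len k)) then
          res - PySem.Dict.getD (PySem.Dict.counter nums) (PySem.Str.slice target (some (PySem.Str.len k)) none) 0
        else res) res (k, (List.count k nums : Int)))
      = fun res k => res + fA nums target k := by
    funext res k
    dsimp only [fA]
    split_ifs <;> ring
  rw [h, PySem.List.foldl_add, zero_add]

lemma numB_eq_sum (nums : List String) (target : String) :
    num_pairs_alt nums target = (nums.map (fB nums target)).sum := by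
  simp only [num_pairs_alt]
  have h : (fun (res : Int) (w : String) =>
      let res :=
        if PySem.Str.startswith target w then
          res + PySem.Dict.getD (PySem.Dict.counter nums) (PySem.Str.slice target (some (PySem.Str.len w)) none) 0
        else res
      if w.toList ++ w.toList == target.toList then res - 1 else res)
      = fun res w => res + fB nums target w := by
    funext res w
    dsimp only [fB]
    split_ifs <;> ring
  rw [h, PySem.List.foldl_add, zero_add]

lemma sum_ofList_count_mul (l : List String) (g : String → Int) :
    ((PySem.Set.ofList l).map (fun k => (List.count k l : Int) * g k)).sum = (l.map g).sum := by
  have hnd : (PySem.Set.ofList l).Nodup := PySem.Set.nodup_ofList l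
  have hfin : (PySem.Set.ofList l).toFinset = l.toFinset := by
    ext x; simp [PySem.Set.mem_ofList]
  rw [← List.sum_toFinset _ hnd, hfin, Finset.sum_list_map_count]
  exact Finset.sum_congr rfl (fun m _ => by rw [nsmul_eq_mul])

lemma fA_eq_count_mul_fB (nums : List String) (target : String) (k : String) :
    fA nums target k = (List.count k nums : Int) * fB nums target k := by
  unfold fA fB
  rw [PySem.Dict.contains_counter, PySem.Dict.getD_counter, PySem.Dict.getD_counter]
  have hP0 : (PySem.Str.slice target none (some (PySem.Str.len k))).toList = target.toList.take k.toList.length := by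
    simp [PySem.Str.toList_slice, pysem]
  have hS0 : (PySem.Str.slice target (some (PySem.Str.len k)) none).toList = target.toList.drop k.toList.length := by
    simp [PySem.Str.toList_slice, pysem]
  generalize hPdef : PySem.Str.slice target none (some (PySem.Str.len k)) = P at hP0 ⊢
  generalize hSdef : PySem.Str.slice target (some (PySem.Str.len k)) none = S at hS0 ⊢
  have hP := hP0; have hS := hS0
  simp only [Bool.and_eq_true, beq_iff_eq, List.contains_iff_mem]
  by_cases hp : k.toList <+: target.toList
  · have hkP : k = P := String.ext_iff.mpr (by rw [hP]; exact List.prefix_iff_eq_take.mp hp)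
    have hsw : PySem.Str.startswith target k = true := by
      rw [PySem.Str.startswith_eq]; exact (PySem.Chars.startswith_iff _ _).mpr hp
    rw [hsw]
    by_cases hd : k.toList ++ k.toList = target.toList
    · have hkS : k = S := String.ext_iff.mpr (by rw [hS, ← hd, List.drop_left])
      rw [← hkS, ← hkP]
      by_cases hm : k ∈ nums
      · rw [if_pos ⟨rfl, hm⟩, if_pos ⟨rfl, rfl⟩, if_pos rfl, if_pos hd]; ring
      · rw [if_neg (fun h => hm h.2), if_pos ⟨rfl, rfl⟩, if_pos rfl, if_pos hd,
            List.count_eq_zero.mpr hm]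
        ring
    · have hkS : k ≠ S := by
        intro h
        apply hd
        have h1 : k.toList = target.toList.take k.toList.length := List.prefix_iff_eq_take.mp hp
        have h2 : k.toList = target.toList.drop k.toList.length := by
          conv_lhs => rw [h, hS]
        have h3 := List.take_append_drop k.toList.length target.toList
        rw [← h1, ← h2] at h3
        exact h3
      rw [← hkP]
      by_cases hm : S ∈ nums
      · rw [if_pos ⟨rfl, hm⟩, if_neg (fun h => hkS h.1), if_pos rfl, if_neg hd]; ring
      · rw [if_neg (fun h => hm h.2), if_neg (fun h => hkS h.1), if_pos rfl, if_neg hd,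
            List.count_eq_zero.mpr hm]
        ring
  · have hkP : k ≠ P := fun h => hp (List.prefix_iff_eq_take.mpr (by rw [← hP, ← h]))
    have hsw : PySem.Str.startswith target k = false := by
      rw [PySem.Str.startswith_eq]
      exact Bool.eq_false_iff.mpr (fun hh => hp ((PySem.Chars.startswith_iff _ _).mp hh))
    have hdb : ¬(k.toList ++ k.toList = target.toList) := by
      intro h
      exact hp (h ▸ List.prefix_append _ _)
    rw [hsw, if_neg (fun h => hkP h.1), if_neg (fun h => hkP h.2),
        if_neg (fun (h : false = true) => Bool.noConfusion h), if_neg hdb]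
    ring

-- ===== VERDICT (by name: the statement is the Claim_ definition above) =====
theorem num_pairs_spec : Claim_equal_num_pairs := by
  intro nums target _
  unfold Spec_num_pairs
  rw [numA_eq_sum, numB_eq_sum, ← sum_ofList_count_mul nums (fB nums target)]
  exact congrArg List.sum (List.map_congr_left (fun k _ => fA_eq_count_mul_fB nums target k))
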